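-- pv_equiv track=rewrite | github.com/novellus/rays-code-dec-2024 | translate_multichar_sequences.py | translate_multichar_sequences
-- ===== SOURCE A (Python) =====
-- from collections import defaultdict
--
-- def translate_multichar_sequences(alphabet, input_text):
--     # alphabet = dict mapping input sequences to output sequences, eg
--     # {
--     #   'abc': 'z',
--     #   'a': 'zy',
--     #   'def': 'x',
--     #   'gh': 'w',
--     # }
--     # input_text = str
--
--     # verify alhpabet
--     for k in alphabet:
--         assert k, f'alphabet cannot contain an empty string:, "{k}"->"{alphabet[k]}", {alphabet}'
--
--     # stabilize alphabet order to guarantee output order in case one key is a substring of another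
--     alphabet_stable_order = sorted(alphabet, key=lambda x: (len(x), x))
--
--     output_text = ''
--     replacements_made = defaultdict(int)  # {input sequence: int}
--     sequences_without_alphabet_transation = ['']
--     while(input_text):
--         for seq in alphabet_stable_order:
--             if input_text.startswith(seq):
--                 output_text += alphabet[seq]
--                 input_text = input_text[len(seq):]
--
--                 replacements_made[seq] +=1
--
--                 if sequences_without_alphabet_transation[-1]:
--                     sequences_without_alphabet_transation.append('')
--
--                 break
--         else:
--             output_text += input_text[0]
--             sequences_without_alphabet_transation[-1] += input_text[0]
--             input_text = input_text[1:]
--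
--     return output_text, sequences_without_alphabet_transation, replacements_made
-- ===== SOURCE B (Python) =====
-- def translate_multichar_sequences(alphabet, input_text):
--     # One dict/set lookup per candidate length instead of scanning every key
--     # at every position; output assembled with an index pointer and ''.join.
--     keyset = set(alphabet)
--     lengths = sorted({len(k) for k in alphabet})
--     n = len(input_text)
--     out_parts = []
--     runs = ['']
--     counts = {}
--     i = 0
--     while i < n:
--         matched = None
--         for L in lengths:
--             if L <= n - i:
--                 seq = input_text[i:i + L]
--                 if seq in keyset:
--                     matched = seq
--                     break
--         if matched is not None:
--             out_parts.append(alphabet[matched])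
--             counts[matched] = counts.get(matched, 0) + 1
--             if runs[-1]:
--                 runs.append('')
--             i += len(matched)
--         else:
--             out_parts.append(input_text[i])
--             runs[-1] += input_text[i]
--             i += 1
--     return ''.join(out_parts), runs, counts
-- ===== Notes on version B (the rewrite author's own statement) =====
-- stated objective: faster
-- what changed: Instead of scanning every alphabet key with startswith at each text position, B precomputes the key set and the sorted distinct key lengths once and does one substring/set lookup per distinct length at each position, advancing an index pointer and joining output parts at the end instead of repeatedly slicing and concatenating strings.
-- outside the precondition, e.g. on translate_multichar_sequences({'': 'x'}, 'ab'): A raises AssertionError, B does not finish within the time limit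
import Mathlib
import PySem

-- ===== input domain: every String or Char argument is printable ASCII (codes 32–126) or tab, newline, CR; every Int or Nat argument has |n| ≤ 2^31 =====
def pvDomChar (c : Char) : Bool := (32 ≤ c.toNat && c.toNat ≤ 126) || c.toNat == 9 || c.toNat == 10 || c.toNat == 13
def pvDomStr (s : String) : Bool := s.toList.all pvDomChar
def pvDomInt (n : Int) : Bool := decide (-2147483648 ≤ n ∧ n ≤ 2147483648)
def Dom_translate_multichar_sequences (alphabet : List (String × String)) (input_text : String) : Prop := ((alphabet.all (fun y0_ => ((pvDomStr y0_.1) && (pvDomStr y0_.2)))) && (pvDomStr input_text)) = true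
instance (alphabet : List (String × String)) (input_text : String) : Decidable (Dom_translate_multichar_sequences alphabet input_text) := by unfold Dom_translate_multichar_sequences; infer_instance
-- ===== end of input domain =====

-- B replaces A's per-position scan over every alphabet key by one set lookup per distinct key
-- length (plus an index pointer and ''.join instead of repeated slicing/concatenation); same
-- return value, proved equal on all inputs whose keys are nonempty (A asserts on empty keys).

-- ===== PORT A =====
-- The Python dict argument is modelled as PySem.Dict built from the association list (Python
-- dict semantics: first position, last value).  Strings are processed as their char lists
-- (exact: Python slicing/comparison are code-point-wise).  The sort key (len(x), x) is ported
-- as the lexicographic pair Lex (Nat × List Char), exactly Python's tuple comparison.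
def pvAkey (x : List Char) : Lex (Nat × List Char) := toLex (x.length, x)

def pvAloop (d : PySem.Dict String String) (stable : List (List Char)) :
    Nat → List Char → List Char → List (List Char) → PySem.Dict String Int →
    List Char × List (List Char) × PySem.Dict String Int
  | 0, _, out, runs, counts => (out, runs, counts)
  | fuel + 1, t, out, runs, counts =>
    match t with
    | [] => (out, runs, counts)                               -- while(input_text) exits
    | c :: rest =>
      match stable.find? (fun seq => PySem.Chars.startswith (c :: rest) seq) with
      | some seq =>                                           -- for … break branch
          pvAloop d stable fuel ((c :: rest).drop seq.length)
            (out ++ (d.getD (String.ofList seq) "").toList)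
            (if PySem.List.pyGetD runs (-1) [] ≠ [] then runs ++ [[]] else runs)
            (counts.modify (String.ofList seq) 0 (· + 1))
      | none =>                                               -- for … else branch
          pvAloop d stable fuel rest (out ++ [c])
            (runs.dropLast ++ [PySem.List.pyGetD runs (-1) [] ++ [c]])
            counts

-- the assert loop over the alphabet raises on an empty key: those inputs are outside Pre_ below
def translate_multichar_sequences (alphabet : List (String × String)) (input_text : String) :
    String × List String × (List (String × Int)) :=
  let d : PySem.Dict String String := PySem.Dict.ofList alphabet
  let stable := PySem.List.sorted (d.keys.map String.toList) pvAkey false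
  let r := pvAloop d stable (input_text.toList.length + 1) input_text.toList [] [[]] PySem.Dict.empty
  (String.ofList r.1, r.2.1.map String.ofList, r.2.2.items)

-- ===== PORT B =====
def pvBloop (d : PySem.Dict String String) (keyset : PySem.Set (List Char)) (lengths : List Nat)
    (cs : List Char) (n : Nat) :
    Nat → Nat → List (List Char) → List (List Char) → PySem.Dict String Int →
    List (List Char) × List (List Char) × PySem.Dict String Int
  | 0, _, parts, runs, counts => (parts, runs, counts)
  | fuel + 1, i, parts, runs, counts =>
    if i < n then
      match lengths.findSome? (fun L =>
          if L ≤ n - i then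
            (if PySem.Set.contains keyset ((cs.drop i).take L) then some ((cs.drop i).take L)
             else none)
          else none) with
      | some seq =>
          pvBloop d keyset lengths cs n fuel (i + seq.length)
            (parts ++ [(d.getD (String.ofList seq) "").toList])
            (if PySem.List.pyGetD runs (-1) [] ≠ [] then runs ++ [[]] else runs)
            (counts.insert (String.ofList seq) (counts.getD (String.ofList seq) 0 + 1))
      | none =>
          pvBloop d keyset lengths cs n fuel (i + 1)
            (parts ++ [(cs.drop i).take 1])
            (runs.dropLast ++ [PySem.List.pyGetD runs (-1) [] ++ (cs.drop i).take 1])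
            counts
    else (parts, runs, counts)

def translate_multichar_sequences_alt (alphabet : List (String × String)) (input_text : String) :
    String × List String × (List (String × Int)) :=
  let d : PySem.Dict String String := PySem.Dict.ofList alphabet
  let keyset : PySem.Set (List Char) := PySem.Set.ofList (d.keys.map String.toList)
  let lengths : List Nat :=
    PySem.List.sorted (PySem.Set.ofList ((d.keys.map String.toList).map List.length))
      (fun L => L) false
  let cs := input_text.toList
  let n := cs.length
  let r := pvBloop d keyset lengths cs n (n + 1) 0 [] [[]] PySem.Dict.empty
  (String.ofList (PySem.Chars.join [] r.1), r.2.1.map String.ofList, r.2.2.items)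

-- ===== PRECONDITION & SPEC =====
-- Pre_ excludes alphabets containing an empty key, on which Python A raises AssertionError.
def Pre_translate_multichar_sequences (alphabet : List (String × String)) (input_text : String) : Prop :=
  ∀ p ∈ alphabet, p.1 ≠ ""
instance (alphabet : List (String × String)) (input_text : String) :
    Decidable (Pre_translate_multichar_sequences alphabet input_text) := by
  unfold Pre_translate_multichar_sequences; infer_instance

def pvWitness_translate_multichar_sequences : (List (String × String)) × String :=
  ([("ab", "z"), ("a", "yy"), ("cd", "")], "aabcdc ab")

def Spec_translate_multichar_sequences (alphabet : List (String × String)) (input_text : String) (out : String × List String × (List (String × Int))) : Prop := out = translate_multichar_sequences_alt alphabet input_text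
instance (alphabet : List (String × String)) (input_text : String) (out : String × List String × (List (String × Int))) : Decidable (Spec_translate_multichar_sequences alphabet input_text out) := by unfold Spec_translate_multichar_sequences; infer_instance

-- ===== CLAIM (what is proved, stated in full; the proofs are below) =====
def Claim_equal_translate_multichar_sequences : Prop := ∀ (alphabet : List (String × String)) (input_text : String), Dom_translate_multichar_sequences alphabet input_text → Pre_translate_multichar_sequences alphabet input_text → Spec_translate_multichar_sequences alphabet input_text (translate_multichar_sequences alphabet input_text)

-- ===== LEMMAS AND PROOFS =====

theorem pvFindSome?_sorted {α β : Type} (l : List α) (f : α → Option β) (r : α → α → Prop)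
    (hpw : l.Pairwise r) (x : α) (b : β) (hx : x ∈ l) (hfx : f x = some b)
    (hmin : ∀ y ∈ l, (f y).isSome → y ≠ x → ¬ r y x) : l.findSome? f = some b := by
  induction l with
  | nil => cases hx
  | cons a l ih =>
    rw [List.pairwise_cons] at hpw
    rw [List.findSome?_cons]
    rcases Option.eq_none_or_eq_some (f a) with ha | ⟨v, ha⟩
    · rw [ha]
      rcases List.mem_cons.1 hx with rfl | hx'
      · rw [hfx] at ha; cases ha
      · exact ih hpw.2 hx' (fun y hy hs hne => hmin y (List.mem_cons_of_mem a hy) hs hne)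
    · rw [ha]
      have hax : a = x := by
        by_contra hne
        have hx' : x ∈ l := by
          rcases List.mem_cons.1 hx with rfl | hx'
          · exact absurd rfl hne
          · exact hx'
        exact hmin a List.mem_cons_self (by simp [ha]) hne (hpw.1 x hx')
      subst hax
      rw [hfx] at ha; cases ha; rfl

theorem pvFind?_sorted {α : Type} (l : List α) (p : α → Bool) (r : α → α → Prop)
    (hpw : l.Pairwise r) (x : α) (hx : x ∈ l) (hpx : p x = true)
    (hmin : ∀ y ∈ l, p y = true → y ≠ x → ¬ r y x) : l.find? p = some x := by
  induction l with
  | nil => cases hx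
  | cons a l ih =>
    rw [List.pairwise_cons] at hpw
    rw [List.find?_cons]
    by_cases ha : p a = true
    · simp only [ha]
      have hax : a = x := by
        by_contra hne
        have hx' : x ∈ l := by
          rcases List.mem_cons.1 hx with rfl | hx'
          · exact absurd rfl hne
          · exact hx'
        exact hmin a List.mem_cons_self ha hne (hpw.1 x hx')
      rw [hax]
    · simp only [ha]
      have hxa : x ≠ a := fun h => ha (h ▸ hpx)
      have hx' : x ∈ l := by
        rcases List.mem_cons.1 hx with rfl | hx'
        · exact absurd rfl hxa
        · exact hx'
      exact ih hpw.2 hx' (fun y hy hs hne => hmin y (List.mem_cons_of_mem a hy) hs hne)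

theorem pvJoin_append (ps : List (List Char)) (x : List Char) :
    PySem.Chars.join [] (ps ++ [x]) = PySem.Chars.join [] ps ++ x := by
  induction ps with
  | nil => simp [PySem.Chars.join_nil, PySem.Chars.join_singleton]
  | cons a ps ih =>
    cases ps with
    | nil => simp [PySem.Chars.join_singleton, PySem.Chars.join_cons_cons]
    | cons b ps =>
      simp [PySem.Chars.join_cons_cons]
      exact ih

theorem pvChoice_eq (K : List (List Char)) (t : List Char) :
    (PySem.List.sorted K pvAkey false).find? (fun seq => PySem.Chars.startswith t seq)
      = (PySem.List.sorted (PySem.Set.ofList (K.map List.length)) (fun L => L) false).findSome?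
          (fun L => if L ≤ t.length then
              (if PySem.Set.contains (PySem.Set.ofList K) (t.take L) then some (t.take L) else none)
            else none) := by
  have hcont : ∀ y : List Char, PySem.Set.contains (PySem.Set.ofList K) y = true ↔ y ∈ K := by
    intro y; simp [PySem.Set.contains, PySem.Set.mem_ofList]
  by_cases hex : ∃ s ∈ K, PySem.Chars.startswith t s = true
  · have hMne : K.filter (fun s => PySem.Chars.startswith t s) ≠ [] := by
      obtain ⟨s, hsK, hsm⟩ := hex
      intro h
      have : s ∈ K.filter (fun s => PySem.Chars.startswith t s) := List.mem_filter.2 ⟨hsK, hsm⟩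
      rw [h] at this; cases this
    obtain ⟨x0, hmin?⟩ : ∃ x0, PySem.List.min? (K.filter (fun s => PySem.Chars.startswith t s)) (fun s => s.length) = some x0 := by
      rcases h : PySem.List.min? (K.filter (fun s => PySem.Chars.startswith t s)) (fun s => s.length) with _ | x0
      · exact absurd ((PySem.List.min?_eq_none_iff _ _).1 h) hMne
      · exact ⟨x0, rfl⟩
    have hx0M := PySem.List.min?_mem hmin?
    have hx0K : x0 ∈ K := (List.mem_filter.1 hx0M).1
    have hx0m : PySem.Chars.startswith t x0 = true := (List.mem_filter.1 hx0M).2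
    have hx0min : ∀ y ∈ K.filter (fun s => PySem.Chars.startswith t s), x0.length ≤ y.length :=
      PySem.List.min?_isMin hmin?
    have hpre : x0 <+: t := (PySem.Chars.startswith_iff t x0).1 hx0m
    have htake : t.take x0.length = x0 := (List.prefix_iff_eq_take.1 hpre).symm
    have hA : (PySem.List.sorted K pvAkey false).find? (fun seq => PySem.Chars.startswith t seq) = some x0 := by
      apply pvFind?_sorted _ _ (fun a b => pvAkey a ≤ pvAkey b)
        (PySem.List.sorted_pairwise K pvAkey) x0
        ((PySem.List.mem_sorted K pvAkey false x0).2 hx0K) hx0m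
      intro y hy hpy hne hle
      have hyK : y ∈ K := (PySem.List.mem_sorted K pvAkey false y).1 hy
      have hypre : y <+: t := (PySem.Chars.startswith_iff t y).1 hpy
      have hytake : t.take y.length = y := (List.prefix_iff_eq_take.1 hypre).symm
      have hylen : x0.length ≤ y.length := hx0min y (List.mem_filter.2 ⟨hyK, hpy⟩)
      rcases Prod.Lex.le_iff.1 hle with h | ⟨h, _⟩
      · simp only [pvAkey, ofLex_toLex] at h
        omega
      · simp only [pvAkey, ofLex_toLex] at h
        exact hne (by rw [← hytake, h, htake])
    have hB : (PySem.List.sorted (PySem.Set.ofList (K.map List.length)) (fun L => L) false).findSome?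
          (fun L => if L ≤ t.length then
              (if PySem.Set.contains (PySem.Set.ofList K) (t.take L) then some (t.take L) else none)
            else none) = some x0 := by
      apply pvFindSome?_sorted _ _ (fun a b => a ≤ b)
        (PySem.List.sorted_pairwise _ (fun L => L)) x0.length x0
      · rw [PySem.List.mem_sorted, PySem.Set.mem_ofList]
        exact List.mem_map.2 ⟨x0, hx0K, rfl⟩
      · rw [if_pos hpre.length_le, htake, if_pos ((hcont x0).2 hx0K)]
      · intro L hL hsome hne hle
        rw [PySem.List.mem_sorted, PySem.Set.mem_ofList] at hL
        by_cases h1 : L ≤ t.length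
        · rw [if_pos h1] at hsome
          by_cases h2 : PySem.Set.contains (PySem.Set.ofList K) (t.take L) = true
          · have htLK : t.take L ∈ K := (hcont _).1 h2
            have : PySem.Chars.startswith t (t.take L) = true :=
              (PySem.Chars.startswith_iff _ _).2 (List.take_prefix L t)
            have hlen : x0.length ≤ L := by
              have := hx0min _ (List.mem_filter.2 ⟨htLK, this⟩)
              rwa [List.length_take, min_eq_left h1] at this
            omega
          · rw [if_neg h2] at hsome; cases hsome
        · rw [if_neg h1] at hsome; cases hsome
    rw [hA, hB]
  · push Not at hex
    rw [List.find?_eq_none.2 (by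
      intro y hy
      exact fun hp => (hex y ((PySem.List.mem_sorted K pvAkey false y).1 hy)) hp)]
    rw [Eq.comm, List.findSome?_eq_none_iff]
    intro L hL
    by_cases h1 : L ≤ t.length
    · rw [if_pos h1]
      by_cases h2 : PySem.Set.contains (PySem.Set.ofList K) (t.take L) = true
      · exact absurd ((PySem.Chars.startswith_iff _ _).2 (List.take_prefix L t)) (hex _ ((hcont _).1 h2))
      · rw [if_neg h2]
    · rw [if_neg h1]

theorem pvLoop_sync (d : PySem.Dict String String) (K : List (List Char)) (cs : List Char)
    (fuel : Nat) (i : Nat) (hi : i ≤ cs.length) (parts runs : List (List Char))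
    (counts : PySem.Dict String Int) :
    pvAloop d (PySem.List.sorted K pvAkey false) fuel (cs.drop i)
        (PySem.Chars.join [] parts) runs counts
      = (fun r => (PySem.Chars.join [] r.1, r.2.1, r.2.2))
          (pvBloop d (PySem.Set.ofList K)
            (PySem.List.sorted (PySem.Set.ofList (K.map List.length)) (fun L => L) false)
            cs cs.length fuel i parts runs counts) := by
  induction fuel generalizing i parts runs counts with
  | zero => simp [pvAloop, pvBloop]
  | succ fuel ih =>
    by_cases hlt : i < cs.length
    · have ht : cs.drop i ≠ [] := by
        intro h
        have := List.length_drop (i := i) (l := cs)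
        rw [h] at this
        simp at this
        omega
      obtain ⟨c, rest, hcr⟩ := List.exists_cons_of_ne_nil ht
      have hlen : cs.length - i = (c :: rest).length := by
        rw [← hcr, List.length_drop]
      simp only [pvBloop]
      rw [if_pos hlt, hcr, hlen, ← pvChoice_eq K (c :: rest)]
      simp only [pvAloop]
      cases hfind : (PySem.List.sorted K pvAkey false).find? (fun seq => PySem.Chars.startswith (c :: rest) seq) with
      | none =>
          dsimp only
          have h1 : cs.drop (i + 1) = rest := by
            rw [← List.drop_drop, hcr, List.drop_one, List.tail_cons]
          have h2 : (c :: rest).take 1 = [c] := by simp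
          rw [h2, show PySem.Chars.join [] parts ++ [c] = PySem.Chars.join [] (parts ++ [[c]]) from (pvJoin_append parts [c]).symm]
          rw [← h1] at *
          exact ih (i + 1) (by omega) (parts ++ [[c]]) _ counts
      | some seq =>
          dsimp only
          have hsw := List.find?_some hfind
          have hpre : seq <+: (c :: rest) := (PySem.Chars.startswith_iff _ _).1 hsw
          have hle : seq.length ≤ (c :: rest).length := hpre.length_le
          have h1 : cs.drop (i + seq.length) = (c :: rest).drop seq.length := by
            rw [← List.drop_drop, hcr]
          rw [show PySem.Chars.join [] parts ++ (d.getD (String.ofList seq) "").toList = PySem.Chars.join [] (parts ++ [(d.getD (String.ofList seq) "").toList]) from (pvJoin_append _ _).symm]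
          rw [← h1]
          have hmi : counts.modify (String.ofList seq) 0 (· + 1) = counts.insert (String.ofList seq) (counts.getD (String.ofList seq) 0 + 1) := rfl
          rw [hmi]
          exact ih (i + seq.length) (by omega) _ _ _
    · rw [List.drop_eq_nil_of_le (by omega)]
      simp only [pvAloop, pvBloop]
      rw [if_neg hlt]

-- ===== VERDICT (by name: the statement is the Claim_ definition above) =====
theorem translate_multichar_sequences_spec : Claim_equal_translate_multichar_sequences := by
  intro alphabet input_text _ _
  unfold Spec_translate_multichar_sequences translate_multichar_sequences
    translate_multichar_sequences_alt
  have h := pvLoop_sync (PySem.Dict.ofList alphabet)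
      (((PySem.Dict.ofList alphabet).keys).map String.toList) input_text.toList
      (input_text.toList.length + 1) 0 (Nat.zero_le _) [] [[]] PySem.Dict.empty
  rw [List.drop_zero, PySem.Chars.join_nil] at h
  simp only [List.map_map] at h ⊢
  rw [h]
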